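-- pv_equiv track=rewrite | github.com/seckinsertaclalli/Enigma-Console | pi/main.py | modify_integer
-- ===== SOURCE A (Python) =====
-- def modify_integer(input_integer):
--     str_input = str(input_integer)
--     modified_list = [str(int(char) + 9) for char in str_input]
--     for i in range(len(modified_list)):
--         if int(modified_list[i]) > 9:
--             carry, remainder = divmod(int(modified_list[i]), 10)
--             modified_list[i] = str(remainder)
--             if i + 1 < len(modified_list):
--                 modified_list[i + 1] = str(int(modified_list[i + 1]) + carry)
--             else:
--                 modified_list.append(str(carry))
--     result_string = ''.join(modified_list)
--     return result_string
-- ===== SOURCE B (Python) =====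
-- def modify_integer(input_integer):
--     if input_integer == 0:
--         return "9"
--     s = str(input_integer)
--     # closed form: adding 9 to every digit with A's carry chain turns
--     # d0 d1 ... dk into (d0-1) d1 ... dk 1   (for a positive integer)
--     return str(int(s[0]) - 1) + s[1:] + "1"
-- ===== Notes on version B (the rewrite author's own statement) =====
-- stated objective: simpler
-- what changed: Replaces the per-digit carry-propagation loop over a mutable list of digit strings by a closed-form construction: for positive n the answer is (first digit - 1), the remaining digits unchanged, and a trailing '1'; for 0 it is '9'.
import Mathlib
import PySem

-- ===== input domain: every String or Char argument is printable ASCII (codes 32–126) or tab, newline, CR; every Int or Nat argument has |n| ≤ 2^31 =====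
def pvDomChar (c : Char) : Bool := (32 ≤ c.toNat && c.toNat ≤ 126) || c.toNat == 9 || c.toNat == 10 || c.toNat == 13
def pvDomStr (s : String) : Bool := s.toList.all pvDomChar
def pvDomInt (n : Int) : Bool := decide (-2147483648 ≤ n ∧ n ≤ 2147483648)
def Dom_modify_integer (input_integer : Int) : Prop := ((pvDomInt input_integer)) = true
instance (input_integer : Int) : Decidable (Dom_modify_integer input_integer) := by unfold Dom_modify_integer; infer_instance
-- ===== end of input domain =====

-- B replaces A's per-digit carry-propagation loop over a mutable list of digit
-- strings by a closed-form construction ((d0-1), the remaining digits, then '1';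
-- "9" for input 0); objective: simpler.


-- ===== PORT A =====
-- int(char): exact for the digit characters that occur under Pre_ (a non-digit
-- char would make Python raise ValueError; those inputs are excluded by Pre_).
def pvCtoI (c : Char) : Int := (c.toNat : Int) - 48
-- int(s): exact for the non-empty nonnegative all-digit strings A's loop stores.
def pvStoI (s : String) : Int := s.toList.foldl (fun a c => 10 * a + pvCtoI c) 0

-- the body of A's 'for i in range(len(modified_list))' loop, named so lemmas can cite it
def pvStepA (ml : List String) (i : Int) : List String :=
  let v := pvStoI (PySem.List.pyGetD ml i "")
  if v > 9 then
    let carry := PySem.Int.floordiv v 10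
    let remainder := PySem.Int.mod v 10
    let ml2 := PySem.List.pySetD ml i (PySem.Int.toStr remainder)
    if i + 1 < (ml2.length : Int) then
      PySem.List.pySetD ml2 (i + 1)
        (PySem.Int.toStr (pvStoI (PySem.List.pyGetD ml2 (i + 1) "") + carry))
    else ml2 ++ [PySem.Int.toStr carry]
  else ml

def modify_integer (input_integer : Int) : String :=
  let str_input := PySem.Int.toStr input_integer
  let modified_list := str_input.toList.map (fun c => PySem.Int.toStr (pvCtoI c + 9))
  let final := (PySem.List.pyRange 0 (modified_list.length : Int) 1).foldl pvStepA modified_list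
  PySem.Str.join "" final

-- ===== PORT B =====
def modify_integer_alt (input_integer : Int) : String :=
  if input_integer == 0 then "9"
  else
    -- str(int(s[0]) - 1) + s[1:] + "1", built on the char list; s = str(n) is
    -- never empty, and int(s[0]) is exact for the digit chars admitted by Pre_
    match (PySem.Int.toStr input_integer).toList with
    | [] => ""  -- unreachable: str(n) is never the empty string
    | c :: rest => String.ofList (PySem.Int.toChars ((c.toNat : Int) - 48 - 1) ++ rest ++ ['1'])

-- ===== PRECONDITION & SPEC =====
-- Pre_ excludes exactly the negative inputs: there str(n) starts with '-' and
-- both A and B raise ValueError at int('-').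
def Pre_modify_integer (input_integer : Int) : Prop := 0 ≤ input_integer
instance (input_integer : Int) : Decidable (Pre_modify_integer input_integer) := by unfold Pre_modify_integer; infer_instance
def pvWitness_modify_integer : Int := (907)

def Spec_modify_integer (input_integer : Int) (out : String) : Prop := out = modify_integer_alt input_integer
instance (input_integer : Int) (out : String) : Decidable (Spec_modify_integer input_integer out) := by unfold Spec_modify_integer; infer_instance

-- ===== CLAIM (what is proved, stated in full; the proofs are below) =====
def Claim_equal_modify_integer : Prop := ∀ (input_integer : Int), Dom_modify_integer input_integer → Pre_modify_integer input_integer → Spec_modify_integer input_integer (modify_integer input_integer)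

-- ===== LEMMAS AND PROOFS =====

theorem pvDigitChar_toNat (k : Nat) (h : k < 10) : (Nat.digitChar k).toNat = 48 + k := by
  interval_cases k <;> rfl

theorem pvCore_spec : ∀ (fuel n : Nat) (ds : List Char), n < fuel →
    ∃ pre : List Char, Nat.toDigitsCore 10 fuel n ds = pre ++ ds ∧ pre ≠ [] ∧
      (∀ c ∈ pre, 48 ≤ c.toNat ∧ c.toNat ≤ 57) ∧
      pre.foldl (fun a c => 10 * a + ((c.toNat : Int) - 48)) 0 = (n : Int) ∧
      (n ≠ 0 → ∀ c, pre.head? = some c → c ≠ '0') := by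
  intro fuel
  induction fuel with
  | zero => omega
  | succ f ih =>
    intro n ds h
    rw [Nat.toDigitsCore]
    by_cases h0 : n / 10 = 0
    · refine ⟨[Nat.digitChar (n % 10)], by simp [h0], by simp, ?_, ?_, ?_⟩
      · intro c hc
        simp at hc
        subst hc
        rw [pvDigitChar_toNat _ (by omega)]
        omega
      · simp [pvDigitChar_toNat _ (by omega : n % 10 < 10)]
        omega
      · intro hn c hc
        have : n < 10 := by omega
        simp at hc
        subst hc
        have : n % 10 = n := by omega
        rw [this]
        interval_cases n <;> simp_all <;> decide
    · have hlt : n / 10 < f := by omega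
      obtain ⟨pre, he, hne, hdig, hfold, hhead⟩ := ih (n / 10) (Nat.digitChar (n % 10) :: ds) hlt
      refine ⟨pre ++ [Nat.digitChar (n % 10)], by simp [h0, he], by simp, ?_, ?_, ?_⟩
      · intro c hc
        rcases List.mem_append.mp hc with h' | h'
        · exact hdig c h'
        · simp at h'; subst h'
          rw [pvDigitChar_toNat _ (by omega)]
          omega
      · rw [List.foldl_append, hfold]
        simp [pvDigitChar_toNat _ (by omega : n % 10 < 10)]
        omega
      · intro hn c hc
        rw [List.head?_append_of_ne_nil _ hne] at hc
        exact hhead h0 c hc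

theorem pvChar_eq (c d : Char) (h : c.toNat = d.toNat) : c = d := by
  apply Char.ext; exact UInt32.toNat_inj.mp h

theorem pvToDigits_small (m : Nat) (h : m < 10) : Nat.toDigits 10 m = [Nat.digitChar m] := by
  simp [Nat.toDigits, Nat.toDigitsCore, Nat.div_eq_of_lt h, Nat.mod_eq_of_lt h]

theorem pvToDigits_spec (m : Nat) :
    (Nat.toDigits 10 m) ≠ [] ∧
    (∀ c ∈ Nat.toDigits 10 m, 48 ≤ c.toNat ∧ c.toNat ≤ 57) ∧
    (Nat.toDigits 10 m).foldl (fun a c => 10 * a + ((c.toNat : Int) - 48)) 0 = (m : Int) ∧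
    (m ≠ 0 → ∀ c, (Nat.toDigits 10 m).head? = some c → c ≠ '0') := by
  obtain ⟨pre, he, h1, h2, h3, h4⟩ := pvCore_spec (m + 1) m [] (by omega)
  rw [Nat.toDigits, he]; simpa using ⟨h1, h2, h3, h4⟩

theorem pvStoI_toStr (v : Int) (h : 0 ≤ v) : pvStoI (PySem.Int.toStr v) = v := by
  have h2 := (pvToDigits_spec v.toNat).2.2.1
  simp only [pvStoI, PySem.Int.toList_toStr, PySem.Int.toChars, if_neg (by omega : ¬ v < 0)]
  simp only [pvCtoI, h2]; omega

theorem pvToChars_digit (c : Char) (h1 : 48 ≤ c.toNat) (h2 : c.toNat ≤ 57) :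
    PySem.Int.toChars ((c.toNat : Int) - 48) = [c] := by
  have hk : ((c.toNat : Int) - 48) = ((c.toNat - 48 : Nat) : Int) := by omega
  rw [hk, PySem.Int.toChars, if_neg (by omega)]
  have h10 : c.toNat - 48 < 10 := by omega
  rw [Int.toNat_natCast, pvToDigits_small _ h10]
  exact congrArg (fun x => [x]) (pvChar_eq _ _ (by rw [pvDigitChar_toNat _ h10]; omega))

theorem pvGetD_at_len {α : Type} (p : List α) (x : α) (r : List α) (d : α) :
    (p ++ x :: r).getD p.length d = x := by
  induction p with
  | nil => rfl
  | cons a p ih => simpa using ih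

theorem pvSet_at_len {α : Type} (p : List α) (x : α) (r : List α) (v : α) :
    (p ++ x :: r).set p.length v = p ++ v :: r := by
  induction p with
  | nil => rfl
  | cons a p ih => simpa using ih

theorem pvJoin_nil_flatten (l : List (List Char)) :
    PySem.Chars.join [] l = l.flatten := by
  induction l with
  | nil => simp [PySem.Chars.join_nil]
  | cons p rest ih =>
    cases rest with
    | nil => simp [PySem.Chars.join_singleton]
    | cons q r => rw [PySem.Chars.join_cons_cons]; simp_all

theorem pvFloordiv_ten (v : Int) (h1 : 10 ≤ v) (h2 : v < 20) :
    PySem.Int.floordiv v 10 = 1 := by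
  rw [PySem.Int.floordiv_eq_ediv_of_pos (by omega)]; omega

theorem pvMod_ten (v : Int) (h1 : 10 ≤ v) (h2 : v < 20) :
    PySem.Int.mod v 10 = v - 10 := by
  rw [PySem.Int.mod_eq_emod_of_pos (by omega)]; omega

theorem pvSetD_zero {α : Type} (xs : List α) (v : α) :
    PySem.List.pySetD xs 0 v = xs.set 0 v := by
  rw [PySem.List.pySetD_of_nonneg xs v (by omega : (0:Int) ≤ 0)]
  rfl

theorem pvFlatten_digits (cs : List Char) (h : ∀ c ∈ cs, 48 ≤ c.toNat ∧ c.toNat ≤ 57) :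
    (cs.map (fun c => (PySem.Int.toStr (pvCtoI c)).toList)).flatten = cs := by
  induction cs with
  | nil => rfl
  | cons c cs ih =>
    have hc := h c (by simp)
    have ih' := ih (fun x hx => h x (by simp [hx]))
    simp only [PySem.Int.toList_toStr] at ih'
    simp only [List.map_cons, List.flatten_cons, PySem.Int.toList_toStr, ih']
    rw [show pvCtoI c = ((c.toNat : Int) - 48) from rfl, pvToChars_digit c hc.1 hc.2]
    rfl

theorem pvLoop_inv : ∀ (cs : List Char) (p : List String) (d : Int),
    (∀ c ∈ cs, 48 ≤ c.toNat ∧ c.toNat ≤ 57) → 0 ≤ d → d ≤ 9 →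
    (PySem.List.pyRange (p.length : Int) ((p.length : Int) + 1 + cs.length) 1).foldl pvStepA
        (p ++ PySem.Int.toStr (d + 10) :: cs.map (fun c => PySem.Int.toStr (pvCtoI c + 9)))
      = p ++ PySem.Int.toStr d :: (cs.map (fun c => PySem.Int.toStr (pvCtoI c)) ++ ["1"]) := by
  intro cs
  induction cs with
  | nil =>
    intro p d _ hd0 hd9
    have hr : PySem.List.pyRange (p.length : Int) ((p.length : Int) + 1 + ([] : List Char).length) 1
        = [(p.length : Int)] := by
      have := PySem.List.pyRange_one_singleton (p.length : Int)
      simpa using this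
    rw [hr]
    simp only [List.foldl, List.map_nil]
    rw [pvStepA]
    simp only [PySem.List.pyGetD_natCast, pvGetD_at_len p _ [] ""]
    rw [pvStoI_toStr _ (by omega), if_pos (by omega)]
    rw [pvFloordiv_ten _ (by omega) (by omega), pvMod_ten _ (by omega) (by omega)]
    simp only [PySem.List.pySetD_natCast, pvSet_at_len]
    rw [if_neg (by simp)]
    norm_num
    decide
  | cons c cs ih =>
    intro p d hdig hd0 hd9
    have hc := hdig c (by simp)
    have hstep : PySem.List.pyRange (p.length : Int) ((p.length : Int) + 1 + ((c :: cs) : List Char).length) 1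
        = (p.length : Int) :: PySem.List.pyRange ((p.length : Int) + 1) ((p.length : Int) + 1 + ((c :: cs) : List Char).length) 1 := by
      apply PySem.List.pyRange_one_cons
      simp; omega
    rw [hstep]
    simp only [List.foldl_cons]
    have hstepA : pvStepA (p ++ PySem.Int.toStr (d + 10) :: (c :: cs).map (fun c => PySem.Int.toStr (pvCtoI c + 9))) (p.length : Int)
        = (p ++ [PySem.Int.toStr d]) ++ PySem.Int.toStr (pvCtoI c + 10) :: cs.map (fun c => PySem.Int.toStr (pvCtoI c + 9)) := by
      rw [pvStepA]
      simp only [List.map_cons, PySem.List.pyGetD_natCast, pvGetD_at_len p _ _ ""]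
      rw [pvStoI_toStr _ (by omega), if_pos (by omega)]
      rw [pvFloordiv_ten _ (by omega) (by omega), pvMod_ten _ (by omega) (by omega)]
      simp only [PySem.List.pySetD_natCast, pvSet_at_len]
      rw [show d + 10 - 10 = d by ring]
      rw [if_pos (by simp)]
      have hcast : ((p.length : Int) + 1) = (((p.length + 1 : Nat)) : Int) := by push_cast; ring
      rw [hcast]
      simp only [PySem.List.pyGetD_natCast, PySem.List.pySetD_natCast]
      have hlen : (p ++ [PySem.Int.toStr d]).length = p.length + 1 := by simp
      have hget : (p ++ PySem.Int.toStr d :: PySem.Int.toStr (pvCtoI c + 9) :: cs.map (fun c => PySem.Int.toStr (pvCtoI c + 9))).getD (p.length + 1) ""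
          = PySem.Int.toStr (pvCtoI c + 9) := by
        have := pvGetD_at_len (p ++ [PySem.Int.toStr d]) (PySem.Int.toStr (pvCtoI c + 9)) (cs.map (fun c => PySem.Int.toStr (pvCtoI c + 9))) ""
        simpa [hlen] using this
      have hset : (p ++ PySem.Int.toStr d :: PySem.Int.toStr (pvCtoI c + 9) :: cs.map (fun c => PySem.Int.toStr (pvCtoI c + 9))).set (p.length + 1) (PySem.Int.toStr (pvCtoI c + 10))
          = (p ++ [PySem.Int.toStr d]) ++ PySem.Int.toStr (pvCtoI c + 10) :: cs.map (fun c => PySem.Int.toStr (pvCtoI c + 9)) := by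
        have := pvSet_at_len (p ++ [PySem.Int.toStr d]) (PySem.Int.toStr (pvCtoI c + 9)) (cs.map (fun c => PySem.Int.toStr (pvCtoI c + 9))) (PySem.Int.toStr (pvCtoI c + 10))
        simpa [hlen] using this
      rw [hget, pvStoI_toStr _ (by simp [pvCtoI]; omega)]
      have : pvCtoI c + 9 + 1 = pvCtoI c + 10 := by ring
      rw [this, hset]
    rw [hstepA]
    have hrange : PySem.List.pyRange ((p.length : Int) + 1) ((p.length : Int) + 1 + ((c :: cs) : List Char).length) 1
        = PySem.List.pyRange (((p ++ [PySem.Int.toStr d]).length : Int)) (((p ++ [PySem.Int.toStr d]).length : Int) + 1 + cs.length) 1 := by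
      congr 1 <;> simp <;> push_cast <;> ring
    rw [hrange]
    have := ih (p ++ [PySem.Int.toStr d]) (pvCtoI c) (fun x hx => hdig x (by simp [hx])) (by simp [pvCtoI]; omega) (by simp [pvCtoI]; omega)
    rw [this]
    simp

theorem pvMain (n : Int) (hn : 0 ≤ n) : modify_integer n = modify_integer_alt n := by
  by_cases h0 : n = 0
  · subst h0; decide
  · have hm : n.toNat ≠ 0 := by omega
    obtain ⟨hne, hdig, hfold, hhead⟩ := pvToDigits_spec n.toNat
    have hchars : PySem.Int.toChars n = Nat.toDigits 10 n.toNat := by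
      rw [PySem.Int.toChars, if_neg (by omega)]
    rcases hs : Nat.toDigits 10 n.toNat with _ | ⟨c0, cs⟩
    · exact absurd hs hne
    rw [hs] at hdig hhead
    have hc0 := hdig c0 (by simp)
    have hc0ne : c0 ≠ '0' := hhead hm c0 (by simp)
    have hc0lo : 49 ≤ c0.toNat := by
      have h48 : ('0' : Char).toNat = 48 := rfl
      rcases Nat.lt_or_ge c0.toNat 49 with h | h
      · exact absurd (pvChar_eq c0 '0' (by omega)) hc0ne
      · exact h
    have halt : modify_integer_alt n
        = String.ofList (PySem.Int.toChars (pvCtoI c0 - 1) ++ cs ++ ['1']) := by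
      rw [modify_integer_alt, if_neg (by simpa using h0)]
      rw [PySem.Int.toList_toStr, hchars, hs]
      rfl
    rw [halt]
    refine String.toList_inj.mp ?_
    simp only [modify_integer, PySem.Int.toList_toStr, hchars, hs, List.map_cons]
    have hL : ((PySem.Int.toStr (pvCtoI c0 + 9) :: cs.map (fun c => PySem.Int.toStr (pvCtoI c + 9))).length : Int)
        = 1 + cs.length := by simp; ring
    rw [hL, PySem.List.pyRange_one_cons (by positivity)]
    simp only [List.foldl_cons]
    rcases cs with _ | ⟨c1, cs'⟩
    · -- single digit
      simp only [List.map_nil, List.length_nil]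
      have hstep : pvStepA [PySem.Int.toStr (pvCtoI c0 + 9)] 0
          = [PySem.Int.toStr (pvCtoI c0 - 1), PySem.Int.toStr 1] := by
        rw [pvStepA]
        simp only [PySem.List.pyGetD_zero_cons]
        rw [pvStoI_toStr _ (by simp [pvCtoI]; omega), if_pos (by simp [pvCtoI]; omega)]
        rw [pvFloordiv_ten _ (by simp [pvCtoI]; omega) (by simp [pvCtoI]; omega),
          pvMod_ten _ (by simp [pvCtoI]; omega) (by simp [pvCtoI]; omega)]
        simp only [pvSetD_zero]
        simp only [Int.toNat_zero, List.set_cons_zero]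
        rw [if_neg (by simp)]
        rw [show pvCtoI c0 + 9 - 10 = pvCtoI c0 - 1 by ring]
        rfl
      rw [hstep]
      rw [show ((0:Int) + 1) = 1 by norm_num, show ((1:Int) + (0:Nat)) = 1 by norm_num,
        PySem.List.pyRange_one_eq_nil (le_refl 1)]
      simp only [List.foldl_nil]
      rw [PySem.Str.toList_join]
      simp only [List.map_cons, List.map_nil, PySem.Int.toList_toStr]
      rw [show (("" : String).toList) = ([] : List Char) from rfl]
      rw [PySem.Chars.join_cons_cons, PySem.Chars.join_singleton]
      simp [show PySem.Int.toChars 1 = ['1'] from rfl]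
    · -- at least two digits
      have hc1 := hdig c1 (by simp)
      have hstep : pvStepA (PySem.Int.toStr (pvCtoI c0 + 9) :: (c1 :: cs').map (fun c => PySem.Int.toStr (pvCtoI c + 9))) 0
          = [PySem.Int.toStr (pvCtoI c0 - 1)] ++ PySem.Int.toStr (pvCtoI c1 + 10) :: cs'.map (fun c => PySem.Int.toStr (pvCtoI c + 9)) := by
        rw [pvStepA]
        simp only [PySem.List.pyGetD_zero_cons]
        rw [pvStoI_toStr _ (by simp [pvCtoI]; omega), if_pos (by simp [pvCtoI]; omega)]
        rw [pvFloordiv_ten _ (by simp [pvCtoI]; omega) (by simp [pvCtoI]; omega),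
          pvMod_ten _ (by simp [pvCtoI]; omega) (by simp [pvCtoI]; omega)]
        simp only [pvSetD_zero]
        simp only [Int.toNat_zero, List.set_cons_zero, List.map_cons]
        rw [if_pos (by simp)]
        rw [show ((0:Int) + 1) = ((1:Nat):Int) by norm_num]
        simp only [PySem.List.pyGetD_natCast, PySem.List.pySetD_natCast]
        simp only [List.getD_cons_succ, List.getD_cons_zero, List.set_cons_succ, List.set_cons_zero]
        rw [pvStoI_toStr _ (by simp [pvCtoI]; omega)]
        rw [show pvCtoI c0 + 9 - 10 = pvCtoI c0 - 1 by ring,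
          show pvCtoI c1 + 9 + 1 = pvCtoI c1 + 10 by ring]
        rfl
      rw [hstep]
      have hrange : PySem.List.pyRange ((0:Int) + 1) (1 + ((c1 :: cs').length : Int)) 1
          = PySem.List.pyRange (([PySem.Int.toStr (pvCtoI c0 - 1)].length : Int))
              (([PySem.Int.toStr (pvCtoI c0 - 1)].length : Int) + 1 + cs'.length) 1 := by
        congr 1 <;> simp <;> ring
      rw [hrange, pvLoop_inv cs' [PySem.Int.toStr (pvCtoI c0 - 1)] (pvCtoI c1)
        (fun x hx => hdig x (by simp [hx])) (by simp [pvCtoI]; omega) (by simp [pvCtoI]; omega)]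
      rw [PySem.Str.toList_join]
      rw [show (("" : String).toList) = ([] : List Char) from rfl, pvJoin_nil_flatten]
      have hflat := pvFlatten_digits (c1 :: cs') (fun x hx => hdig x (by simp [hx]))
      simp only [List.map_cons, List.flatten_cons, PySem.Int.toList_toStr] at hflat
      simp only [List.map_cons, List.map_append, List.flatten_cons, List.flatten_append,
        List.map_nil, List.flatten_nil, Function.comp_def, PySem.Int.toList_toStr,
        List.append_nil, List.nil_append, String.toList_ofList]
      simp only [List.map_map, Function.comp_def, PySem.Int.toList_toStr]
      have hflat2 : PySem.Int.toChars (pvCtoI c1) ++ ((List.map (fun c => PySem.Int.toChars (pvCtoI c)) cs').flatten ++ ['1']) = c1 :: (cs' ++ ['1']) := by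
        rw [← List.append_assoc, hflat]
        rfl
      simp only [List.append_assoc, show ("1" : String).toList = ['1'] from rfl, hflat2]
      simp

-- ===== VERDICT (by name: the statement is the Claim_ definition above) =====
theorem modify_integer_spec : Claim_equal_modify_integer := by
  intro n _ hpre
  exact pvMain n hpre
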